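-- pv_equiv track=rewrite | github.com/RicardMatteo/Advent-Of-Code-2025 | Day12/day12.py | get_masks
-- ===== SOURCE A (Python) =====
-- def get_masks(w, h, shape_coords):
--     masks = set()
--     base = list(shape_coords)
--     for _ in range(2):
--         for _ in range(4):
--             min_r, min_c = min(r for r, c in base), min(c for r, c in base)
--             norm = [(r-min_r, c-min_c) for r, c in base]
--             max_r, max_c = max(r for r, c in norm), max(c for r, c in norm)
--
--             for r in range(h - max_r):
--                 for c in range(w - max_c):
--                     m = 0
--                     for dr, dc in norm:
--                         m |= 1 << ((r+dr)*w + (c+dc))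
--                     masks.add(m)
--             base = [(c, -r) for r, c in base]
--         base = [(r, -c) for r, c in base]
--     return sorted(list(masks), reverse=True)
-- ===== SOURCE B (Python) =====
-- def get_masks(w, h, shape_coords):
--     # Build, for each of the 8 orientations, its placement masks as an already
--     # strictly-descending list (base mask shifted by decreasing offsets), and
--     # combine them by merging sorted lists with duplicate elimination: no set
--     # and no final sort are needed.
--     def merge_desc(a, b):
--         out = []
--         i = j = 0
--         while i < len(a) and j < len(b):
--             if a[i] > b[j]:
--                 out.append(a[i]); i += 1
--             elif a[i] < b[j]:
--                 out.append(b[j]); j += 1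
--             else:
--                 out.append(a[i]); i += 1; j += 1
--         out.extend(a[i:])
--         out.extend(b[j:])
--         return out
--
--     result = []
--     base = list(shape_coords)
--     for _ in range(2):
--         for _ in range(4):
--             min_r = min(r for r, c in base)
--             min_c = min(c for r, c in base)
--             norm = [(r - min_r, c - min_c) for r, c in base]
--             max_r = max(r for r, c in norm)
--             max_c = max(c for r, c in norm)
--             if h - max_r > 0 and w - max_c > 0:
--                 bm = 0
--                 for dr, dc in norm:
--                     bm |= 1 << (dr * w + dc)
--                 lst = [bm << (rr * w + cc)
--                        for rr in range(h - max_r - 1, -1, -1)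
--                        for cc in range(w - max_c - 1, -1, -1)]
--                 result = merge_desc(result, lst)
--             base = [(c, -r) for r, c in base]
--         base = [(r, -c) for r, c in base]
--     return result
-- ===== Notes on version B (the rewrite author's own statement) =====
-- stated objective: alternative
-- what changed: B drops A's hash set and final sort entirely: each orientation's placements are emitted as an already strictly-descending list (the orientation's base bitmask shifted by decreasing offsets) and the eight lists are combined by a two-pointer merge that eliminates duplicates on the fly, so the result is produced directly in sorted order.
import Mathlib
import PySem

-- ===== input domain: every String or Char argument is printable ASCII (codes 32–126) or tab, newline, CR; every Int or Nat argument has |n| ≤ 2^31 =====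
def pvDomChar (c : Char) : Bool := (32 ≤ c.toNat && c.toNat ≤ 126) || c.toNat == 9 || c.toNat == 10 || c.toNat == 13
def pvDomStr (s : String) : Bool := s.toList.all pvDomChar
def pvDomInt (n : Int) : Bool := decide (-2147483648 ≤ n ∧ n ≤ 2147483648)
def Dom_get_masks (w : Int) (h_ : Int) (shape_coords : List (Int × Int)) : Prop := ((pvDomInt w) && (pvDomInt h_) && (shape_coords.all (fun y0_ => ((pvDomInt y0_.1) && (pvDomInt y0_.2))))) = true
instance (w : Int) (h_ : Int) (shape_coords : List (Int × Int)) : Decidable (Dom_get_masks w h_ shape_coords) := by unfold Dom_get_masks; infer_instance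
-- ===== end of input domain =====

-- B replaces A's hash set + final sort by a merge of per-orientation lists that are produced
-- already strictly descending (each orientation's base mask shifted by decreasing offsets),
-- eliminating duplicates during the merge (objective: alternative).

-- ===== PORT A =====
-- min(xs) / max(xs) on a nonempty list of ints (Pre_ guarantees nonemptiness)
def pvMin (xs : List Int) : Int := xs.min?.getD 0
def pvMax (xs : List Int) : Int := xs.max?.getD 0
-- base = [(c, -r) for r, c in base]  (rotation)
def pvRot (base : List (Int × Int)) : List (Int × Int) := base.map (fun p => (p.2, -p.1))
-- base = [(r, -c) for r, c in base]  (reflection)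
def pvRef (base : List (Int × Int)) : List (Int × Int) := base.map (fun p => (p.1, -p.2))
-- norm = [(r-min_r, c-min_c) for r, c in base]
def pvNorm (base : List (Int × Int)) : List (Int × Int) :=
  let min_r := pvMin (base.map (·.1))
  let min_c := pvMin (base.map (·.2))
  base.map (fun p => (p.1 - min_r, p.2 - min_c))

-- the placement double loop of A: for each (r, c), build m bit by bit and add it to masks
def pvPlaceA (w h_ : Int) (norm : List (Int × Int)) (masks : PySem.Set Int) : PySem.Set Int :=
  let max_r := pvMax (norm.map (·.1))
  let max_c := pvMax (norm.map (·.2))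
  (PySem.List.pyRange 0 (h_ - max_r) 1).foldl (fun masks r =>
    (PySem.List.pyRange 0 (w - max_c) 1).foldl (fun masks c =>
      PySem.Set.add masks
        (norm.foldl (fun m p => PySem.Int.bor m ((1 : Int) <<< ((r + p.1) * w + (c + p.2)).toNat)) 0))
      masks) masks

def get_masks (w : Int) (h_ : Int) (shape_coords : List (Int × Int)) : List Int :=
  let st := (PySem.List.pyRange 0 2 1).foldl (fun st _ =>
      let st4 := (PySem.List.pyRange 0 4 1).foldl
          (fun (st : List (Int × Int) × PySem.Set Int) _ =>
            (pvRot st.1, pvPlaceA w h_ (pvNorm st.1) st.2)) st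
      (pvRef st4.1, st4.2)) (shape_coords, (PySem.Set.empty : PySem.Set Int))
  PySem.List.sorted st.2 (fun x => x) true

-- ===== PORT B =====
-- merge_desc: merge two strictly descending lists, dropping duplicates (the while loop of Source B)
def pvMergeDesc : List Int → List Int → List Int
  | [], b => b
  | a, [] => a
  | x :: xs, y :: ys =>
      if x > y then x :: pvMergeDesc xs (y :: ys)
      else if x < y then y :: pvMergeDesc (x :: xs) ys
      else x :: pvMergeDesc xs ys
  termination_by a b => a.length + b.length

-- lst = [bm << (rr*w+cc) for rr in range(h-max_r-1,-1,-1) for cc in range(w-max_c-1,-1,-1)]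
def pvPlaceList (w h_ : Int) (norm : List (Int × Int)) : List Int :=
  let max_r := pvMax (norm.map (·.1))
  let max_c := pvMax (norm.map (·.2))
  let bm := norm.foldl (fun m p => PySem.Int.bor m ((1 : Int) <<< (p.1 * w + p.2).toNat)) 0
  (PySem.List.pyRange (h_ - max_r - 1) (-1) (-1)).flatMap (fun rr =>
    (PySem.List.pyRange (w - max_c - 1) (-1) (-1)).map (fun cc => bm <<< (rr * w + cc).toNat))

-- one orientation of Source B's loop body: merge in this orientation's placements (if any)
def pvStepB (w h_ : Int) (result : List Int) (base : List (Int × Int)) : List Int :=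
  let norm := pvNorm base
  let max_r := pvMax (norm.map (·.1))
  let max_c := pvMax (norm.map (·.2))
  if 0 < h_ - max_r ∧ 0 < w - max_c then pvMergeDesc result (pvPlaceList w h_ norm)
  else result

def get_masks_alt (w : Int) (h_ : Int) (shape_coords : List (Int × Int)) : List Int :=
  ((PySem.List.pyRange 0 2 1).foldl (fun st _ =>
      let st4 := (PySem.List.pyRange 0 4 1).foldl
          (fun (st : List Int × List (Int × Int)) _ =>
            (pvStepB w h_ st.1 st.2, pvRot st.2)) st
      (st4.1, pvRef st4.2)) (([] : List Int), shape_coords)).1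

-- ===== PRECONDITION & SPEC =====
-- A raises ValueError (min of an empty sequence) on an empty shape_coords; excluded.
def Pre_get_masks (w : Int) (h_ : Int) (shape_coords : List (Int × Int)) : Prop := shape_coords ≠ []
instance (w : Int) (h_ : Int) (shape_coords : List (Int × Int)) : Decidable (Pre_get_masks w h_ shape_coords) := by unfold Pre_get_masks; infer_instance
def pvWitness_get_masks : Int × Int × (List (Int × Int)) := (3, 2, [(0, 0), (0, 1)])
def Spec_get_masks (w : Int) (h_ : Int) (shape_coords : List (Int × Int)) (out : List Int) : Prop := out = get_masks_alt w h_ shape_coords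
instance (w : Int) (h_ : Int) (shape_coords : List (Int × Int)) (out : List Int) : Decidable (Spec_get_masks w h_ shape_coords out) := by unfold Spec_get_masks; infer_instance

-- ===== CLAIM (what is proved, stated in full; the proofs are below) =====
def Claim_equal_get_masks : Prop := ∀ (w : Int) (h_ : Int) (shape_coords : List (Int × Int)), Dom_get_masks w h_ shape_coords → Pre_get_masks w h_ shape_coords → Spec_get_masks w h_ shape_coords (get_masks w h_ shape_coords)

-- ===== LEMMAS AND PROOFS =====

-- (a ||| b) <<< n distributes over shifting (Nat)
theorem pv_lor_shiftLeft (a b n : Nat) : (a ||| b) <<< n = (a <<< n) ||| (b <<< n) := by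
  apply Nat.eq_of_testBit_eq
  intro i
  simp [Nat.testBit_shiftLeft, Bool.and_or_distrib_left]

-- bitwise-or of nonnegative ints is nonnegative
theorem pv_bor_nonneg (a b : Int) (ha : 0 ≤ a) (hb : 0 ≤ b) : 0 ≤ PySem.Int.bor a b := by
  obtain ⟨m, rfl⟩ := Int.eq_ofNat_of_zero_le ha
  obtain ⟨n, rfl⟩ := Int.eq_ofNat_of_zero_le hb
  rw [PySem.Int.bor_natCast]
  exact Int.natCast_nonneg _

-- bitwise-or with a positive int is positive
theorem pv_bor_pos (a b : Int) (ha : 0 ≤ a) (hb : 0 < b) : 0 < PySem.Int.bor a b := by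
  obtain ⟨m, rfl⟩ := Int.eq_ofNat_of_zero_le ha
  obtain ⟨n, rfl⟩ := Int.eq_ofNat_of_zero_le (le_of_lt hb)
  rw [PySem.Int.bor_natCast]
  have h1 : 0 < n := by exact_mod_cast hb
  exact_mod_cast lt_of_lt_of_le h1 Nat.right_le_or

-- shifting distributes over bitwise-or of nonnegative ints
theorem pv_bor_shl (a b : Int) (ha : 0 ≤ a) (hb : 0 ≤ b) (n : Nat) :
    (PySem.Int.bor a b) <<< n = PySem.Int.bor (a <<< n) (b <<< n) := by
  obtain ⟨p, rfl⟩ := Int.eq_ofNat_of_zero_le ha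
  obtain ⟨q, rfl⟩ := Int.eq_ofNat_of_zero_le hb
  rw [PySem.Int.bor_natCast]
  rw [show ((↑(p ||| q) : Int)) <<< n = ((((p ||| q) <<< n : Nat)) : Int) by simp [Int.natCast_shiftLeft]]
  rw [show ((↑p : Int)) <<< n = (((p <<< n : Nat)) : Int) by simp [Int.natCast_shiftLeft]]
  rw [show ((↑q : Int)) <<< n = (((q <<< n : Nat)) : Int) by simp [Int.natCast_shiftLeft]]
  rw [pv_lor_shiftLeft, PySem.Int.bor_natCast]

theorem pv_one_shl (k : Nat) : (1 : Int) <<< k = (((1 <<< k : Nat)) : Int) := by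
  rw [show ((1 : Int)) = (((1 : Nat)) : Int) from rfl]
  simp [Int.natCast_shiftLeft]

theorem pv_one_shl_nonneg (k : Nat) : 0 ≤ (1 : Int) <<< k := by
  rw [pv_one_shl]; exact Int.natCast_nonneg _

theorem pv_one_shl_add (n s : Nat) : (1 : Int) <<< (n + s) = ((1 : Int) <<< n) <<< s := by
  rw [pv_one_shl, pv_one_shl,
      show ((↑((1 : Nat) <<< n) : Int)) <<< s = (((((1 : Nat) <<< n) <<< s : Nat)) : Int) by
        simp [Int.natCast_shiftLeft]]
  congr 1
  simp [Nat.shiftLeft_eq, pow_add]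

theorem pv_zero_shl (n : Nat) : (0 : Int) <<< n = 0 := by
  rw [show ((0 : Int)) = (((0 : Nat)) : Int) from rfl]
  simp

-- shifting every bit position by s shifts the whole or-fold by s
theorem pv_fold_shift (g : Int × Int → Nat) (s : Nat) (l : List (Int × Int)) (a : Int)
    (ha : 0 ≤ a) :
    l.foldl (fun m p => PySem.Int.bor m ((1 : Int) <<< (g p + s))) (a <<< s)
      = (l.foldl (fun m p => PySem.Int.bor m ((1 : Int) <<< g p)) a) <<< s := by
  induction l generalizing a with
  | nil => rfl
  | cons p l ih =>
      simp only [List.foldl_cons]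
      rw [pv_one_shl_add, ← pv_bor_shl a _ ha (pv_one_shl_nonneg _),
          ih _ (pv_bor_nonneg _ _ ha (pv_one_shl_nonneg _))]

-- every coordinate of a normalized nonempty orientation is nonnegative
theorem pv_norm_nonneg (o : List (Int × Int)) (ho : o ≠ []) :
    ∀ p ∈ pvNorm o, 0 ≤ p.1 ∧ 0 ≤ p.2 := by
  intro p hp
  simp only [pvNorm, List.mem_map] at hp
  obtain ⟨q, hq, rfl⟩ := hp
  constructor
  · have hne : (o.map (·.1)).min? ≠ none := by
      simp [List.min?_eq_none_iff, ho]
    obtain ⟨m, hm⟩ := Option.ne_none_iff_exists'.mp hne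
    have := (List.min?_eq_some_iff.mp hm).2 q.1 (List.mem_map_of_mem hq)
    simp only [pvMin, hm, Option.getD_some]
    omega
  · have hne : (o.map (·.2)).min? ≠ none := by
      simp [List.min?_eq_none_iff, ho]
    obtain ⟨m, hm⟩ := Option.ne_none_iff_exists'.mp hne
    have := (List.min?_eq_some_iff.mp hm).2 q.2 (List.mem_map_of_mem hq)
    simp only [pvMin, hm, Option.getD_some]
    omega

-- pvMax of a nonempty list of nonnegative ints is nonnegative
theorem pv_max_nonneg (xs : List Int) (hne : xs ≠ []) (h : ∀ x ∈ xs, 0 ≤ x) :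
    0 ≤ pvMax xs := by
  have hne' : xs.max? ≠ none := by simp [List.max?_eq_none_iff, hne]
  obtain ⟨m, hm⟩ := Option.ne_none_iff_exists'.mp hne'
  have := (List.max?_eq_some_iff.mp hm).1
  simp only [pvMax, hm, Option.getD_some]
  exact h m this

theorem pv_rot_ne (o : List (Int × Int)) (ho : o ≠ []) : pvRot o ≠ [] := by
  simp [pvRot, ho]

theorem pv_ref_ne (o : List (Int × Int)) (ho : o ≠ []) : pvRef o ≠ [] := by
  simp [pvRef, ho]

theorem pv_one_shl_pos (k : Nat) : 0 < (1 : Int) <<< k := by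
  rw [pv_one_shl]
  have : 0 < (1 <<< k : Nat) := by rw [Nat.shiftLeft_eq]; positivity
  exact_mod_cast this

theorem pv_fold_pos_aux (w : Int) (l : List (Int × Int)) (a : Int) (ha : 0 < a) :
    0 < l.foldl (fun m p => PySem.Int.bor m ((1 : Int) <<< (p.1 * w + p.2).toNat)) a := by
  induction l generalizing a with
  | nil => exact ha
  | cons p l ih =>
      simp only [List.foldl_cons]
      refine ih _ ?_
      rw [PySem.Int.bor_comm]
      exact pv_bor_pos _ _ (pv_one_shl_nonneg _) ha

-- the base mask of a nonempty orientation is positive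
theorem pv_bm_pos (w : Int) (norm : List (Int × Int)) (hne : norm ≠ []) :
    0 < norm.foldl (fun m p => PySem.Int.bor m ((1 : Int) <<< (p.1 * w + p.2).toNat)) 0 := by
  cases norm with
  | nil => exact absurd rfl hne
  | cons p l =>
      simp only [List.foldl_cons]
      exact pv_fold_pos_aux w l _ (pv_bor_pos _ _ le_rfl (pv_one_shl_pos _))

-- A's per-cell mask is the base mask shifted by the placement offset
theorem pv_cell (w : Int) (norm : List (Int × Int))
    (hnn : ∀ p ∈ norm, 0 ≤ p.1 ∧ 0 ≤ p.2) (r c : Int) (hr : 0 ≤ r) (hc : 0 ≤ c) (hw : 0 < w) :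
    norm.foldl (fun m p => PySem.Int.bor m ((1 : Int) <<< ((r + p.1) * w + (c + p.2)).toNat)) 0
      = (norm.foldl (fun m p => PySem.Int.bor m ((1 : Int) <<< (p.1 * w + p.2).toNat)) 0)
          <<< (r * w + c).toNat := by
  have hs0 : 0 ≤ r * w + c := by positivity
  have hcong : norm.foldl
        (fun m p => PySem.Int.bor m ((1 : Int) <<< ((r + p.1) * w + (c + p.2)).toNat)) 0
      = norm.foldl
        (fun m p => PySem.Int.bor m ((1 : Int) <<< ((p.1 * w + p.2).toNat + (r * w + c).toNat))) 0 := by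
    apply PySem.List.foldl_congr_mem
    intro acc p hp
    obtain ⟨hp1, hp2⟩ := hnn p hp
    have h1 : 0 ≤ p.1 * w + p.2 := by positivity
    have heq : (r + p.1) * w + (c + p.2) = (p.1 * w + p.2) + (r * w + c) := by ring
    congr 2
    rw [heq, Int.toNat_add h1 hs0]
  have hfs := pv_fold_shift (fun p => (p.1 * w + p.2).toNat) ((r * w + c).toNat) norm 0 le_rfl
  rw [pv_zero_shl] at hfs
  rw [hcong, hfs]

-- a countdown range is strictly descending
theorem pv_pairwise_gt_pyRange_neg (a b : Int) :
    (PySem.List.pyRange a b (-1)).Pairwise (· > ·) := by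
  rw [PySem.List.pyRange_neg_one_eq_reverse]
  exact List.pairwise_reverse.mpr (PySem.List.pairwise_lt_pyRange_one _ _)

-- merge membership
theorem pv_mem_merge (a b : List Int) (x : Int) : x ∈ pvMergeDesc a b ↔ x ∈ a ∨ x ∈ b := by
  fun_induction pvMergeDesc a b with
  | case1 => simp
  | case2 => simp
  | case3 x' xs y ys h ih => simp_all; tauto
  | case4 x' xs y ys h h' ih => simp_all; tauto
  | case5 x' xs y ys h h' ih =>
      have : x' = y := by omega
      subst this; simp_all; tauto

-- merge of strictly descending lists is strictly descending
theorem pv_pairwise_merge (a b : List Int) (ha : a.Pairwise (· > ·)) (hb : b.Pairwise (· > ·)) :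
    (pvMergeDesc a b).Pairwise (· > ·) := by
  fun_induction pvMergeDesc a b with
  | case1 => exact hb
  | case2 => exact ha
  | case3 x' xs y ys h ih =>
      rw [List.pairwise_cons] at ha ⊢
      refine ⟨?_, ih ha.2 hb⟩
      intro z hz
      rcases (pv_mem_merge _ _ _).mp hz with hz | hz
      · exact ha.1 z hz
      · rw [List.pairwise_cons] at hb
        rcases List.mem_cons.mp hz with rfl | hz
        · exact h
        · exact lt_trans (hb.1 z hz) h
  | case4 x' xs y ys h h' ih =>
      rw [List.pairwise_cons] at hb ⊢
      refine ⟨?_, ih ha hb.2⟩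
      intro z hz
      rcases (pv_mem_merge _ _ _).mp hz with hz | hz
      · rw [List.pairwise_cons] at ha
        rcases List.mem_cons.mp hz with rfl | hz
        · exact h'
        · exact lt_trans (ha.1 z hz) h'
      · exact hb.1 z hz
  | case5 x' xs y ys h h' ih =>
      have hxy : x' = y := by omega
      rw [List.pairwise_cons] at ha hb ⊢
      refine ⟨?_, ih ha.2 hb.2⟩
      intro z hz
      rcases (pv_mem_merge _ _ _).mp hz with hz | hz
      · exact ha.1 z hz
      · subst hxy; exact hb.1 z hz

-- generic: a fold whose step only adds elements characterized by P
theorem pv_mem_foldl {β : Type} (F : β → PySem.Set Int → PySem.Set Int) (P : β → Int → Prop)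
    (hF : ∀ r s x, x ∈ F r s ↔ x ∈ s ∨ P r x) (l : List β) (S : PySem.Set Int) (x : Int) :
    x ∈ l.foldl (fun s r => F r s) S ↔ x ∈ S ∨ ∃ r ∈ l, P r x := by
  induction l generalizing S with
  | nil => simp
  | cons r l ih => simp [ih, hF]; tauto

-- generic: a fold whose step preserves Nodup
theorem pv_nodup_foldl {β : Type} (F : β → PySem.Set Int → PySem.Set Int)
    (hF : ∀ r s, s.Nodup → (F r s).Nodup) (l : List β) (S : PySem.Set Int) (hS : S.Nodup) :
    (l.foldl (fun s r => F r s) S).Nodup := by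
  induction l generalizing S with
  | nil => exact hS
  | cons r l ih => exact ih _ (hF _ _ hS)

-- strict monotonicity of shifting a positive mask
theorem pv_shl_lt (bm : Int) (hbm : 0 < bm) (s t : Int) (hs : 0 ≤ s) (hst : s < t) :
    bm <<< s.toNat < bm <<< t.toNat := by
  rw [Int.shiftLeft_eq, Int.shiftLeft_eq]
  have : s.toNat < t.toNat := by omega
  exact mul_lt_mul_of_pos_left (by exact_mod_cast pow_lt_pow_right₀ (by norm_num) this) hbm

-- membership in A's placement fold
theorem pv_mem_placeA (w h_ : Int) (norm : List (Int × Int)) (S : PySem.Set Int) (x : Int) :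
    x ∈ pvPlaceA w h_ norm S ↔ x ∈ S ∨
      ∃ r ∈ PySem.List.pyRange 0 (h_ - pvMax (norm.map (·.1))) 1,
        ∃ c ∈ PySem.List.pyRange 0 (w - pvMax (norm.map (·.2))) 1,
          x = norm.foldl
                (fun m p => PySem.Int.bor m ((1 : Int) <<< ((r + p.1) * w + (c + p.2)).toNat)) 0 := by
  simp only [pvPlaceA]
  exact pv_mem_foldl _
    (fun r x => ∃ c ∈ PySem.List.pyRange 0 (w - pvMax (norm.map (·.2))) 1,
      x = norm.foldl
            (fun m p => PySem.Int.bor m ((1 : Int) <<< ((r + p.1) * w + (c + p.2)).toNat)) 0)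
    (fun r s y => PySem.Set.mem_foldl_add _ _ s y) _ S x

-- A's placement fold keeps the set duplicate-free
theorem pv_nodup_placeA (w h_ : Int) (norm : List (Int × Int)) (S : PySem.Set Int)
    (hS : S.Nodup) : (pvPlaceA w h_ norm S).Nodup := by
  simp only [pvPlaceA]
  refine pv_nodup_foldl _ ?_ _ _ hS
  intro r s hs
  refine pv_nodup_foldl (fun c s => PySem.Set.add s _) ?_ _ _ hs
  intro c s' hs'
  exact PySem.Set.nodup_add _ _ hs'

-- per-orientation: B's step matches A's placement loop on set contents, keeping the invariant
theorem pv_step (w h_ : Int) (o : List (Int × Int)) (ho : o ≠ [])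
    (L : List Int) (S : PySem.Set Int)
    (hP : L.Pairwise (· > ·)) (hmem : ∀ x, x ∈ L ↔ x ∈ S) (hS : S.Nodup) :
    (pvStepB w h_ L o).Pairwise (· > ·) ∧
    (∀ x, x ∈ pvStepB w h_ L o ↔ x ∈ pvPlaceA w h_ (pvNorm o) S) ∧
    (pvPlaceA w h_ (pvNorm o) S).Nodup := by
  have hnn := pv_norm_nonneg o ho
  have hnorm_ne : pvNorm o ≠ [] := by simp [pvNorm, ho]
  have hmr0 : 0 ≤ pvMax ((pvNorm o).map (·.1)) := by
    apply pv_max_nonneg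
    · simp [hnorm_ne]
    · intro x hx
      obtain ⟨p, hp, rfl⟩ := List.mem_map.mp hx
      exact (hnn p hp).1
  have hmc0 : 0 ≤ pvMax ((pvNorm o).map (·.2)) := by
    apply pv_max_nonneg
    · simp [hnorm_ne]
    · intro x hx
      obtain ⟨p, hp, rfl⟩ := List.mem_map.mp hx
      exact (hnn p hp).2
  have hdupA := pv_nodup_placeA w h_ (pvNorm o) S hS
  by_cases hg : 0 < h_ - pvMax ((pvNorm o).map (·.1)) ∧ 0 < w - pvMax ((pvNorm o).map (·.2))
  · -- placements exist
    obtain ⟨hg1, hg2⟩ := hg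
    have hw : 0 < w := by omega
    have hbm : 0 < (pvNorm o).foldl
        (fun m p => PySem.Int.bor m ((1 : Int) <<< (p.1 * w + p.2).toNat)) 0 :=
      pv_bm_pos w _ hnorm_ne
    have hstep : pvStepB w h_ L o = pvMergeDesc L (pvPlaceList w h_ (pvNorm o)) := by
      simp only [pvStepB]
      rw [if_pos ⟨hg1, hg2⟩]
    -- membership in B's placement list
    have hmemL : ∀ x, x ∈ pvPlaceList w h_ (pvNorm o) ↔
        ∃ r, (0 ≤ r ∧ r < h_ - pvMax ((pvNorm o).map (·.1))) ∧
          ∃ c, (0 ≤ c ∧ c < w - pvMax ((pvNorm o).map (·.2))) ∧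
            x = ((pvNorm o).foldl
                  (fun m p => PySem.Int.bor m ((1 : Int) <<< (p.1 * w + p.2).toNat)) 0)
                <<< (r * w + c).toNat := by
      intro x
      simp only [pvPlaceList, List.mem_flatMap, List.mem_map, PySem.List.mem_pyRange_neg_one]
      constructor
      · rintro ⟨rr, ⟨hr1, hr2⟩, cc, ⟨⟨hc1, hc2⟩, rfl⟩⟩
        exact ⟨rr, ⟨by omega, by omega⟩, cc, ⟨by omega, by omega⟩, rfl⟩
      · rintro ⟨rr, ⟨hr1, hr2⟩, cc, ⟨hc1, hc2⟩, rfl⟩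
        exact ⟨rr, ⟨by omega, by omega⟩, cc, ⟨⟨by omega, by omega⟩, rfl⟩⟩
    -- B's placement list is strictly descending
    have hPlst : (pvPlaceList w h_ (pvNorm o)).Pairwise (· > ·) := by
      simp only [pvPlaceList, List.flatMap_def]
      rw [List.pairwise_flatten]
      constructor
      · intro l hl
        obtain ⟨rr, hrr, rfl⟩ := List.mem_map.mp hl
        rw [PySem.List.mem_pyRange_neg_one] at hrr
        refine List.pairwise_map.mpr ?_
        refine (pv_pairwise_gt_pyRange_neg _ _).imp_of_mem ?_
        intro c1 c2 h1 h2 hgt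
        rw [PySem.List.mem_pyRange_neg_one] at h1 h2
        have hbase : 0 ≤ rr * w := mul_nonneg (by omega) (by omega)
        exact pv_shl_lt _ hbm _ _ (by omega) (by omega)
      · refine List.pairwise_map.mpr ?_
        refine (pv_pairwise_gt_pyRange_neg _ _).imp_of_mem ?_
        intro r1 r2 h1 h2 hgt x hx y hy
        rw [PySem.List.mem_pyRange_neg_one] at h1 h2
        obtain ⟨c1, hc1, rfl⟩ := List.mem_map.mp hx
        obtain ⟨c2, hc2, rfl⟩ := List.mem_map.mp hy
        rw [PySem.List.mem_pyRange_neg_one] at hc1 hc2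
        have hmul : (r2 + 1) * w ≤ r1 * w :=
          mul_le_mul_of_nonneg_right (by omega) (by omega)
        have hbase : 0 ≤ r2 * w := mul_nonneg (by omega) (by omega)
        refine pv_shl_lt _ hbm _ _ (by omega) ?_
        have : r2 * w + w ≤ r1 * w := by linarith [hmul]
        omega
    -- membership in A's result, expressed through shifted base masks
    have hmemA : ∀ x, x ∈ pvPlaceA w h_ (pvNorm o) S ↔ x ∈ S ∨
        ∃ r, (0 ≤ r ∧ r < h_ - pvMax ((pvNorm o).map (·.1))) ∧
          ∃ c, (0 ≤ c ∧ c < w - pvMax ((pvNorm o).map (·.2))) ∧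
            x = ((pvNorm o).foldl
                  (fun m p => PySem.Int.bor m ((1 : Int) <<< (p.1 * w + p.2).toNat)) 0)
                <<< (r * w + c).toNat := by
      intro x
      rw [pv_mem_placeA]
      apply or_congr_right
      constructor
      · rintro ⟨r, hr, c, hc, rfl⟩
        rw [PySem.List.mem_pyRange_one] at hr hc
        exact ⟨r, ⟨hr.1, by omega⟩, c, ⟨hc.1, by omega⟩,
          pv_cell w (pvNorm o) hnn r c hr.1 hc.1 hw⟩
      · rintro ⟨r, hr, c, hc, rfl⟩
        refine ⟨r, PySem.List.mem_pyRange_one.mpr ⟨hr.1, by omega⟩,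
                c, PySem.List.mem_pyRange_one.mpr ⟨hc.1, by omega⟩,
                (pv_cell w (pvNorm o) hnn r c hr.1 hc.1 hw).symm⟩
    refine ⟨?_, ?_, hdupA⟩
    · rw [hstep]
      exact pv_pairwise_merge _ _ hP hPlst
    · intro x
      rw [hstep, pv_mem_merge, hmemA x, hmemL x, hmem x]
  · -- no placements: A's ranges are empty, B skips the merge
    have hfix : ∀ (l : List Int) (s : PySem.Set Int), l.foldl (fun masks _ => masks) s = s := by
      intro l
      induction l with
      | nil => intro s; rfl
      | cons a l ih => intro s; exact ih s
    have hAS : pvPlaceA w h_ (pvNorm o) S = S := by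
      simp only [pvPlaceA]
      rcases not_and_or.mp hg with hg1 | hg1
      · rw [PySem.List.pyRange_one_eq_nil (show h_ - pvMax ((pvNorm o).map (·.1)) ≤ 0 by omega)]
        rfl
      · simp only [PySem.List.pyRange_one_eq_nil
            (show w - pvMax ((pvNorm o).map (·.2)) ≤ 0 by omega), List.foldl_nil]
        exact hfix _ S
    have hstep : pvStepB w h_ L o = L := by
      simp only [pvStepB]
      rw [if_neg hg]
    rw [hstep, hAS]
    exact ⟨hP, hmem, hS⟩

-- ===== VERDICT (by name: the statement is the Claim_ definition above) =====
theorem get_masks_spec : Claim_equal_get_masks := by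
  intro w h_ sc _ hpre
  unfold Spec_get_masks get_masks get_masks_alt
  have h2 : PySem.List.pyRange 0 2 1 = [0, 1] := by decide
  have h4 : PySem.List.pyRange 0 4 1 = [0, 1, 2, 3] := by decide
  simp only [h2, h4, List.foldl_cons, List.foldl_nil]
  have n0 : sc ≠ [] := hpre
  have n1 := pv_rot_ne _ n0
  have n2 := pv_rot_ne _ n1
  have n3 := pv_rot_ne _ n2
  have n4 := pv_ref_ne _ (pv_rot_ne _ n3)
  have n5 := pv_rot_ne _ n4
  have n6 := pv_rot_ne _ n5
  have n7 := pv_rot_ne _ n6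
  have h0 := pv_step w h_ sc n0 [] PySem.Set.empty (by simp) (by simp [PySem.Set.empty]) (by simp [PySem.Set.empty])
  obtain ⟨p0, m0, d0⟩ := h0
  have h1 := pv_step w h_ _ n1 _ _ p0 m0 d0
  obtain ⟨p1, m1, d1⟩ := h1
  have h2' := pv_step w h_ _ n2 _ _ p1 m1 d1
  obtain ⟨p2, m2, d2⟩ := h2'
  have h3 := pv_step w h_ _ n3 _ _ p2 m2 d2
  obtain ⟨p3, m3, d3⟩ := h3
  have h4' := pv_step w h_ _ n4 _ _ p3 m3 d3
  obtain ⟨p4, m4, d4⟩ := h4'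
  have h5 := pv_step w h_ _ n5 _ _ p4 m4 d4
  obtain ⟨p5, m5, d5⟩ := h5
  have h6 := pv_step w h_ _ n6 _ _ p5 m5 d5
  obtain ⟨p6, m6, d6⟩ := h6
  have h7 := pv_step w h_ _ n7 _ _ p6 m6 d6
  obtain ⟨p7, m7, d7⟩ := h7
  exact PySem.List.sorted_rev_eq_of_perm_of_pairwise_gt _ _ (fun x : Int => x)
    ((List.perm_ext_iff_of_nodup (p7.imp (fun h => ne_of_gt h)) d7).mpr m7) p7
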